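-- pv_equiv track=rewrite | github.com/VivekSinghM/Python | problem 22.py | totalNameScore
-- ===== SOURCE A (Python) =====
-- def countscore(word,alpha):                 #count and return score of word using dict
--     if(len(word)<=1):
--         return alpha[word[0]]
--     return alpha[word[0]]+countscore(word[1:],alpha)
--
-- def totalNameScore(li):
--     totalScore=0
--     nameScore={}                                        # dict to score score of diff words
--     alpha={ chr(i):i-64 for i in range (65,91) }        # creat a dict of A-Z with Score 1-26
--     print (alpha)
--     for i in range(len(li)):
--         w=li[i].upper()                 # convert word int uppercase
--         try:                            # check if nameScore(dict) have word or not if not then creat new entery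
--             temp = nameScore[w]
--         except KeyError:
--             temp=countscore(w,alpha)
--             nameScore[w]=temp           # creat new entery
--         totalScore += (i+1) * temp      # word score * word position
--     return totalScore
-- ===== SOURCE B (Python) =====
-- # B: one-pass comprehension over enumerate; no recursion, no per-word memo dict; A's debug
-- # print(alpha) side effect is dropped (return value is unchanged).
-- def totalNameScore(li):
--     alpha = {chr(i): i - 64 for i in range(65, 91)}
--     return sum((i + 1) * sum(alpha[c] for c in w.upper())
--                for i, w in enumerate(li))
-- ===== Notes on version B (the rewrite author's own statement) =====
-- stated objective: simpler
-- what changed: Replaces the recursive per-suffix countscore helper and the per-word memo dict with a single comprehension sum((i+1)*sum(alpha[c] for c in w.upper()) for i,w in enumerate(li)); drops A's debug print(alpha).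
-- outside the precondition, e.g. on totalNameScore(['']): A raises IndexError, B returns 0
import Mathlib
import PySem

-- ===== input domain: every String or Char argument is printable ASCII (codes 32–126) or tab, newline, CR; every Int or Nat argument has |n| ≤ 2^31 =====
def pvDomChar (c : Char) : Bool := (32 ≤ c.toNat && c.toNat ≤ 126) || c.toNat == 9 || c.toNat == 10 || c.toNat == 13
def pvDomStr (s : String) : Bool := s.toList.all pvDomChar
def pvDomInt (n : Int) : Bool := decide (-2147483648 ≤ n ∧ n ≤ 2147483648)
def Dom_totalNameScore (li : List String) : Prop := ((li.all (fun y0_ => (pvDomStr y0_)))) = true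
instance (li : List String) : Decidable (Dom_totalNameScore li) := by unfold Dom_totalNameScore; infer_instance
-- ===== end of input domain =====

-- B replaces A's recursive countscore helper and per-word memo dict by one comprehension sum
-- over enumerate; return value unchanged on Pre_, A's debug print(alpha) is dropped.


-- ===== PORT A =====
-- alpha = { chr(i): i-64 for i in range(65,91) }
def pvAlphaA : PySem.Dict Char Int :=
  (PySem.List.pyRange 65 91 1).foldl
    (fun d i => d.insert (Char.ofNat i.toNat) (i - 64)) PySem.Dict.empty

-- countscore(word, alpha); none = IndexError/KeyError
def countscore (word : List Char) (alpha : PySem.Dict Char Int) : Option Int :=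
  if word.length ≤ 1 then
    (PySem.List.pyGet? word 0).bind (fun c => alpha.get? c)
  else
    (PySem.List.pyGet? word 0).bind (fun c =>
      (alpha.get? c).bind (fun v =>
        (countscore (PySem.List.slice word (some 1) none) alpha).map (fun r => v + r)))
termination_by word.length
decreasing_by
  simp only [PySem.List.slice_from_one, List.length_tail]
  omega

-- one iteration of A's for-loop (the try/except cache lookup); none = a raise propagating
def pvStepA (alpha : PySem.Dict Char Int) (st : Option (Int × PySem.Dict String Int))
    (i : Int) (s : String) : Option (Int × PySem.Dict String Int) :=
  st.bind (fun p =>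
    let w := PySem.Str.upper s
    match p.2.get? w with
    | some temp => some (p.1 + (i + 1) * temp, p.2)
    | none =>
      (countscore w.toList alpha).map (fun temp =>
        (p.1 + (i + 1) * temp, p.2.insert w temp)))

def totalNameScore (li : List String) : Int :=
  let alpha := pvAlphaA
  let st :=
    (PySem.List.pyRange 0 (PySem.List.len li) 1).foldl
      (fun st i => pvStepA alpha st i (PySem.List.pyGetD li i ""))
      (some (0, PySem.Dict.empty))
  match st with
  | some p => p.1
  | none => 0        -- unreachable under Pre_ (the Python raises instead)

-- ===== PORT B =====
-- alpha = { chr(i): i-64 for i in range(65,91) }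
def pvAlphaB : PySem.Dict Char Int :=
  (PySem.List.pyRange 65 91 1).foldl
    (fun d i => d.insert (Char.ofNat i.toNat) (i - 64)) PySem.Dict.empty

-- sum(alpha[c] for c in w.upper()); none = KeyError
def pvWordScoreB (w : String) : Option Int :=
  (PySem.Str.upper w).toList.foldl
    (fun acc c => acc.bind (fun x => (pvAlphaB.get? c).map (fun v => x + v))) (some 0)

def totalNameScore_alt (li : List String) : Int :=
  match (PySem.List.enumerate li 0).foldl
      (fun acc p => acc.bind (fun x =>
        (pvWordScoreB p.2).map (fun sc => x + (p.1 + 1) * sc))) (some 0) with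
  | some t => t
  | none => 0        -- unreachable under Pre_ (the Python raises instead)

-- ===== PRECONDITION & SPEC =====
-- Pre_ excludes inputs on which A raises: a list containing an empty word (IndexError in
-- countscore) or a word with a character that is not an ASCII letter (uncaught KeyError on alpha).
def Pre_totalNameScore (li : List String) : Prop :=
  (li.all (fun s => !s.toList.isEmpty &&
      s.toList.all (fun c =>
        (65 ≤ c.toNat && c.toNat ≤ 90) || (97 ≤ c.toNat && c.toNat ≤ 122)))) = true
instance (li : List String) : Decidable (Pre_totalNameScore li) := by
  unfold Pre_totalNameScore; infer_instance

def pvWitness_totalNameScore : List String := ["Colin", "anna", "Colin"]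

def Spec_totalNameScore (li : List String) (out : Int) : Prop := out = totalNameScore_alt li
instance (li : List String) (out : Int) : Decidable (Spec_totalNameScore li out) := by
  unfold Spec_totalNameScore; infer_instance

-- ===== CLAIM (what is proved, stated in full; the proofs are below) =====
def Claim_equal_totalNameScore : Prop :=
  ∀ (li : List String), Dom_totalNameScore li → Pre_totalNameScore li →
    Spec_totalNameScore li (totalNameScore li)

-- ===== LEMMAS AND PROOFS =====

def pvLetter (c : Char) : Prop := (65 ≤ c.toNat ∧ c.toNat ≤ 90) ∨ (97 ≤ c.toNat ∧ c.toNat ≤ 122)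

def pvScore (cs : List Char) : Int := (cs.map (fun c => (c.toNat : Int) - 64)).sum

lemma pvAlphaA_get_ofNat (n : Nat) (h1 : 65 ≤ n) (h2 : n ≤ 90) :
    pvAlphaA.get? (Char.ofNat n) = some ((n : Int) - 64) := by
  interval_cases n <;> decide

lemma pvAlphaA_get (c : Char) (h1 : 65 ≤ c.toNat) (h2 : c.toNat ≤ 90) :
    pvAlphaA.get? c = some ((c.toNat : Int) - 64) := by
  have := pvAlphaA_get_ofNat c.toNat h1 h2
  rwa [Char.ofNat_toNat] at this

lemma countscore_eq (cs : List Char) (hne : cs ≠ [])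
    (hup : ∀ c ∈ cs, 65 ≤ c.toNat ∧ c.toNat ≤ 90) :
    countscore cs pvAlphaA = some (pvScore cs) := by
  induction cs with
  | nil => exact absurd rfl hne
  | cons c rest ih =>
    obtain ⟨h1, h2⟩ := hup c (List.mem_cons_self ..)
    rcases rest with _ | ⟨c', rest'⟩
    · rw [countscore]
      simp [PySem.List.pyGet?, PySem.List.pyIdx?, pvAlphaA_get c h1 h2, pvScore]
    · rw [countscore]
      have hrec := ih (by simp) (fun x hx => hup x (List.mem_cons_of_mem _ hx))
      simp only [List.length_cons, PySem.List.slice_from_one, List.tail_cons] at *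
      have hpos : (0:Int) ≤ (rest'.length : Int) + 1 := by positivity
      simp [PySem.List.pyGet?, PySem.List.pyIdx?, hpos, pvAlphaA_get c h1 h2, hrec, pvScore]

lemma upper_letter (c : Char) (h : pvLetter c) :
    65 ≤ (PySem.Chars.upperChar c).toNat ∧ (PySem.Chars.upperChar c).toNat ≤ 90 := by
  have ha : ('a' ≤ c) ↔ 97 ≤ c.toNat := by rw [Char.le_def, UInt32.le_iff_toNat_le]; rfl
  have hz : (c ≤ 'z') ↔ c.toNat ≤ 122 := by rw [Char.le_def, UInt32.le_iff_toNat_le]; rfl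
  simp only [PySem.Chars.upperChar, PySem.Chars.islower, Bool.and_eq_true,
    decide_eq_true_eq, ha, hz]
  split_ifs with hlow
  · have hv : (Char.ofNat (c.toNat - 32)).toNat = c.toNat - 32 := by
      rw [Char.toNat_ofNat, if_pos]
      exact Or.inl (by omega)
    rw [hv]
    omega
  · rcases h with ⟨h1, h2⟩ | ⟨h1, h2⟩
    · exact ⟨h1, h2⟩
    · exact absurd ⟨h1, h2⟩ hlow

-- good word = nonempty, all ASCII letters (the Pre_ condition per word, as a Prop)
def pvGood (s : String) : Prop := s.toList ≠ [] ∧ ∀ c ∈ s.toList, pvLetter c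

lemma countscore_upper (s : String) (h : pvGood s) :
    countscore (PySem.Str.upper s).toList pvAlphaA = some (pvScore (PySem.Str.upper s).toList) := by
  apply countscore_eq
  · simp only [PySem.Str.toList_upper, PySem.Chars.upper]
    intro hmap
    exact h.1 (List.map_eq_nil_iff.mp hmap)
  · intro c hc
    simp only [PySem.Str.toList_upper, PySem.Chars.upper, List.mem_map] at hc
    obtain ⟨c0, hc0, rfl⟩ := hc
    exact upper_letter c0 (h.2 c0 hc0)

-- the loop invariant: cached scores are the true scores

set_option maxHeartbeats 800000 in
lemma pvStepA_cached (alpha : PySem.Dict Char Int) (acc : Int) (ns : PySem.Dict String Int)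
    (i : Int) (s : String) (temp : Int) (h : ns.get? (PySem.Str.upper s) = some temp) :
    pvStepA alpha (some (acc, ns)) i s = some (acc + (i + 1) * temp, ns) := by
  simp [pvStepA, h]

set_option maxHeartbeats 800000 in
lemma pvStepA_new (alpha : PySem.Dict Char Int) (acc : Int) (ns : PySem.Dict String Int)
    (i : Int) (s : String) (v : Int) (h : ns.get? (PySem.Str.upper s) = none)
    (hs : countscore (PySem.Str.upper s).toList alpha = some v) :
    pvStepA alpha (some (acc, ns)) i s
      = some (acc + (i + 1) * v, ns.insert (PySem.Str.upper s) v) := by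
  simp [pvStepA, h]
  refine ⟨v, ?_, Or.inl rfl, rfl⟩
  rw [← PySem.Str.toList_upper]
  exact hs

lemma loop_eq (l : List String) (s : Int) (acc : Int) (ns : PySem.Dict String Int)
    (hns : ∀ k v, ns.get? k = some v → v = pvScore k.toList)
    (hl : ∀ w ∈ l, pvGood w) :
    ∃ ns',
      (PySem.List.enumerate l s).foldl
        (fun st p => pvStepA pvAlphaA st p.1 p.2) (some (acc, ns))
      = some (acc + ((PySem.List.enumerate l s).map (fun p =>
          (p.1 + 1) * pvScore (PySem.Str.upper p.2).toList)).sum, ns') := by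
  induction l generalizing s acc ns with
  | nil => exact ⟨ns, by simp [PySem.List.enumerate_nil]⟩
  | cons w l ih =>
    have hw := hl w (List.mem_cons_self ..)
    have hl' : ∀ x ∈ l, pvGood x := fun x hx => hl x (List.mem_cons_of_mem _ hx)
    rw [PySem.List.enumerate_cons]
    simp only [List.foldl_cons, List.map_cons, List.sum_cons]
    cases hc : ns.get? (PySem.Str.upper w) with
    | some temp =>
      have ht := hns _ _ hc
      obtain ⟨ns', h'⟩ := ih (s + 1)
        (acc + (s + 1) * pvScore (PySem.Str.upper w).toList) ns hns hl'
      refine ⟨ns', ?_⟩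
      rw [pvStepA_cached pvAlphaA acc ns s w temp hc, ht, h', add_assoc]
    | none =>
      have hns' : ∀ k v,
          (ns.insert (PySem.Str.upper w) (pvScore (PySem.Str.upper w).toList)).get? k = some v →
          v = pvScore k.toList := by
        intro k v hk
        rw [PySem.Dict.get?_insert] at hk
        split at hk
        · rename_i hkw
          subst hkw
          cases hk
          rfl
        · exact hns _ _ hk
      obtain ⟨ns', h'⟩ := ih (s + 1)
        (acc + (s + 1) * pvScore (PySem.Str.upper w).toList)
        (ns.insert (PySem.Str.upper w) (pvScore (PySem.Str.upper w).toList)) hns' hl'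
      refine ⟨ns', ?_⟩
      rw [pvStepA_new pvAlphaA acc ns s w _ hc (countscore_upper w hw), h', add_assoc]

lemma good_of_pre (li : List String) (hpre : Pre_totalNameScore li) :
    ∀ w ∈ li, pvGood w := by
  intro w hw
  unfold Pre_totalNameScore at hpre
  rw [List.all_eq_true] at hpre
  have := hpre w hw
  simp only [Bool.and_eq_true, Bool.not_eq_true', List.isEmpty_eq_false_iff,
    List.all_eq_true, Bool.or_eq_true, Bool.and_eq_true, decide_eq_true_eq] at this
  exact ⟨this.1, fun c hc => by
    have h2 := this.2 c hc
    unfold pvLetter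
    simpa using h2⟩

lemma pvCharsFold (cs : List Char) (a : Int)
    (hup : ∀ c ∈ cs, 65 ≤ c.toNat ∧ c.toNat ≤ 90) :
    cs.foldl (fun acc c => acc.bind (fun x => (pvAlphaB.get? c).map (fun v => x + v))) (some a)
      = some (a + pvScore cs) := by
  induction cs generalizing a with
  | nil => simp [pvScore]
  | cons c rest ih =>
    obtain ⟨h1, h2⟩ := hup c (List.mem_cons_self ..)
    rw [List.foldl_cons]
    simp only [Option.bind_some]
    rw [show pvAlphaB.get? c = some ((c.toNat : Int) - 64) from pvAlphaA_get c h1 h2]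
    simp only [Option.map_some]
    rw [ih (a + ((c.toNat : Int) - 64)) (fun x hx => hup x (List.mem_cons_of_mem _ hx))]
    simp [pvScore, add_assoc]

lemma wordScore_good (w : String) (h : pvGood w) :
    pvWordScoreB w = some (pvScore (PySem.Str.upper w).toList) := by
  unfold pvWordScoreB
  rw [pvCharsFold _ 0 (fun c hc => by
    simp only [PySem.Str.toList_upper, PySem.Chars.upper, List.mem_map] at hc
    obtain ⟨c0, hc0, rfl⟩ := hc
    exact upper_letter c0 (h.2 c0 hc0))]
  rw [zero_add]

lemma altLoop (l : List String) (s t : Int) (hl : ∀ w ∈ l, pvGood w) :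
    (PySem.List.enumerate l s).foldl
      (fun acc p => acc.bind (fun x =>
        (pvWordScoreB p.2).map (fun sc => x + (p.1 + 1) * sc))) (some t)
    = some (t + ((PySem.List.enumerate l s).map (fun p =>
        (p.1 + 1) * pvScore (PySem.Str.upper p.2).toList)).sum) := by
  induction l generalizing s t with
  | nil => simp [PySem.List.enumerate_nil]
  | cons w l ih =>
    have hw := hl w (List.mem_cons_self ..)
    have hl' : ∀ x ∈ l, pvGood x := fun x hx => hl x (List.mem_cons_of_mem _ hx)
    rw [PySem.List.enumerate_cons]
    simp only [List.foldl_cons, List.map_cons, List.sum_cons, Option.bind_some]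
    rw [wordScore_good w hw]
    simp only [Option.map_some]
    rw [ih (s + 1) _ hl', add_assoc]

-- ===== VERDICT (by name: the statement is the Claim_ definition above) =====
theorem totalNameScore_spec : Claim_equal_totalNameScore := by
  intro li _hdom hpre
  unfold Spec_totalNameScore
  have hgood := good_of_pre li hpre
  obtain ⟨ns', hloop⟩ := loop_eq li 0 0 PySem.Dict.empty
    (by intro k v hk; simp [PySem.Dict.get?_empty] at hk) hgood
  rw [PySem.List.enumerate_eq_map_pyRange li "", List.foldl_map, List.map_map] at hloop
  have hA : totalNameScore li
      = match (PySem.List.pyRange 0 (PySem.List.len li) 1).foldl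
          (fun st i => pvStepA pvAlphaA st i (PySem.List.pyGetD li i ""))
          (some (0, PySem.Dict.empty)) with
        | some p => p.1
        | none => 0 := rfl
  rw [hA, hloop]
  have hB : totalNameScore_alt li
      = match (PySem.List.enumerate li 0).foldl
          (fun acc p => acc.bind (fun x =>
            (pvWordScoreB p.2).map (fun sc => x + (p.1 + 1) * sc))) (some 0) with
        | some t => t
        | none => 0 := rfl
  rw [hB, altLoop li 0 0 hgood]
  rw [PySem.List.enumerate_eq_map_pyRange li "", List.map_map]
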